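-- pv_equiv track=rewrite | github.com/benb10/scrabble_helper | scrabble_helper/engine.py | gen_char_groups
-- ===== SOURCE A (Python) =====
-- def gen_char_groups(sequence, separator=" "):
--     """
--     https://stackoverflow.com/questions/54372218/how-to-split-a-list-into-sublists-based-on-a-separator-similar-to-str-split
--     """
--     chunk = []
--     for i, val in enumerate(sequence):
--         if val == separator and chunk:
--             yield chunk
--             chunk = []
--             continue
--         if val != separator:
--             chunk.append((i, val))
--
--     if chunk:
--         yield chunk
-- ===== SOURCE B (Python) =====
-- from itertools import groupby
--
--
-- def gen_char_groups(sequence, separator=" "):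
--     for is_sep, group in groupby(enumerate(sequence), key=lambda iv: iv[1] == separator):
--         if not is_sep:
--             yield list(group)
-- ===== Notes on version B (the rewrite author's own statement) =====
-- stated objective: idiomatic
-- what changed: Replaced the manual accumulator-and-flush loop by itertools.groupby over enumerate(sequence), yielding each maximal run of non-separator (index, value) pairs as one group and skipping separator runs.
import Mathlib
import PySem

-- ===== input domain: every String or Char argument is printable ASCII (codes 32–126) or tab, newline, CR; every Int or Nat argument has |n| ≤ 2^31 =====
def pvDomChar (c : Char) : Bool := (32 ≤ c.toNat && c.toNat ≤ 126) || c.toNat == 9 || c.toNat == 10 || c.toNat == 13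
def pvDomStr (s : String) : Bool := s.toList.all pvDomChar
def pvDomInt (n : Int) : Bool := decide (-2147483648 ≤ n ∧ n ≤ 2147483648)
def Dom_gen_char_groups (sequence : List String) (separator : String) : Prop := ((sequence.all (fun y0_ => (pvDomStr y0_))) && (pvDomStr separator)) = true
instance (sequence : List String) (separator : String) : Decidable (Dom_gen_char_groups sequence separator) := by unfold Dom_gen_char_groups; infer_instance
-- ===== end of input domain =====

-- B replaces A's manual accumulator-and-flush loop by a groupby over enumerate(sequence)
-- (itertools.groupby in Source B), emitting each maximal non-separator run; objective: idiomatic.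

-- ===== PORT A =====
-- A's loop: state = (emitted groups, current chunk); at the end flush a nonempty chunk.
def genA (separator : String) : List (Int × String) → List (Int × String) → List (List (Int × String))
  | chunk, [] => if chunk.isEmpty then [] else [chunk]
  | chunk, (i, val) :: rest =>
    if val == separator && !chunk.isEmpty then
      chunk :: genA separator [] rest
    else if val != separator then
      genA separator (chunk ++ [(i, val)]) rest
    else
      genA separator chunk rest

def gen_char_groups (sequence : List String) (separator : String) : List (List (Int × String)) :=
  genA separator [] (PySem.List.enumerate sequence)

-- ===== PORT B =====
-- Source B's groupby: take the maximal run sharing the head's key (val == separator),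
-- yield it when the key is False, skip it when True.
def genB (separator : String) : List (Int × String) → List (List (Int × String))
  | [] => []
  | (i, v) :: rest =>
    let key := fun (p : Int × String) => (p.2 == separator) == (v == separator)
    let run := rest.takeWhile key
    let rest' := rest.dropWhile key
    if v == separator then genB separator rest'
    else ((i, v) :: run) :: genB separator rest'
termination_by l => l.length
decreasing_by
  · exact Nat.lt_succ_of_le (List.length_dropWhile_le _ _)
  · exact Nat.lt_succ_of_le (List.length_dropWhile_le _ _)

def gen_char_groups_alt (sequence : List String) (separator : String) : List (List (Int × String)) :=
  genB separator (PySem.List.enumerate sequence)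

-- ===== PRECONDITION & SPEC =====
def Spec_gen_char_groups (sequence : List String) (separator : String) (out : List (List (Int × String))) : Prop := out = gen_char_groups_alt sequence separator
instance (sequence : List String) (separator : String) (out : List (List (Int × String))) : Decidable (Spec_gen_char_groups sequence separator out) := by unfold Spec_gen_char_groups; infer_instance

-- ===== CLAIM (what is proved, stated in full; the proofs are below) =====
def Claim_equal_gen_char_groups : Prop := ∀ (sequence : List String) (separator : String), Dom_gen_char_groups sequence separator → Spec_gen_char_groups sequence separator (gen_char_groups sequence separator)

-- ===== LEMMAS AND PROOFS =====

-- Skipping a leading separator is absorbed by genB's run-skipping.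
theorem genB_sep_cons (separator : String) (i : Int) (v : String) (l : List (Int × String))
    (hv : (v == separator) = true) :
    genB separator ((i, v) :: l) = genB separator l := by
  cases l with
  | nil => simp [genB, hv]
  | cons p t =>
    obtain ⟨j, w⟩ := p
    by_cases hw : (w == separator) = true
    · rw [genB, genB]
      simp [hv, hw, List.dropWhile]
    · simp [genB, hv, hw, List.dropWhile]

-- Main invariant: A's nonempty chunk accumulator equals B's pending non-separator run.
theorem genA_eq_genB (separator : String) (l : List (Int × String)) :
    (genA separator [] l = genB separator l) ∧
    (∀ chunk, chunk ≠ [] →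
      genA separator chunk l =
        (chunk ++ l.takeWhile (fun p => p.2 != separator)) ::
          genB separator (l.dropWhile (fun p => p.2 != separator))) := by
  induction l with
  | nil =>
    refine ⟨by simp [genA, genB], ?_⟩
    intro chunk hc
    simp [genA, genB, List.isEmpty_iff, hc]
  | cons p rest ih =>
    obtain ⟨i, v⟩ := p
    obtain ⟨ih1, ih2⟩ := ih
    by_cases hv' : v = separator
    · constructor
      · rw [genB_sep_cons separator i v rest (by simp [hv'])]
        simp [genA, hv', ih1]
      · intro chunk hc
        have hskip := genB_sep_cons separator i separator rest (by simp)
        simp [genA, hv', hc, ih1, List.takeWhile, List.dropWhile, hskip]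
    · have hvb : (v == separator) = false := by simp [hv']
      constructor
      · have h2 := ih2 [(i, v)] (by simp)
        rw [genB]
        simp [genA, hvb, h2, bne]
      · intro chunk hc
        have h2 := ih2 (chunk ++ [(i, v)]) (by simp)
        simp [genA, hvb, h2, bne, List.takeWhile, List.dropWhile]

theorem genA_eq_genB_nil (separator : String) (l : List (Int × String)) :
    genA separator [] l = genB separator l := (genA_eq_genB separator l).1

-- ===== VERDICT (by name: the statement is the Claim_ definition above) =====
theorem gen_char_groups_spec : Claim_equal_gen_char_groups := by
  intro sequence separator _
  unfold Spec_gen_char_groups gen_char_groups gen_char_groups_alt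
  exact genA_eq_genB_nil separator _
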